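-- pv_equiv track=rewrite | github.com/AugustDanell/Kattis-Assignments | Python/nimionese.py | rule_two
-- ===== SOURCE A (Python) =====
-- def rule_two(w, hardconsonants):
--     replace_letter = w[0]
--     index = 0
--     makeReplace = False
--     while index < len(w):
--         if w[index] == "-":
--             #replace_letter = w[index+1]
--             makeReplace = True
--             w.pop(index)
--         else:
--             if makeReplace and w[index] in hardconsonants:
--                 w[index] = replace_letter
--             index += 1
--
--     return w
-- ===== SOURCE B (Python) =====
-- def rule_two(w, hardconsonants):
--     # Note: like A, mutates w in place (final contents equal A's); equivalence claim is about the return value.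
--     replace_letter = w[0]
--     if "-" not in w:
--         return w
--     i = w.index("-")
--     w[i:] = [replace_letter if c in hardconsonants else c for c in w[i:] if c != "-"]
--     return w
-- ===== Notes on version B (the rewrite author's own statement) =====
-- stated objective: simpler
-- what changed: Replaces A's flag-carrying pop/index state machine with a locate-the-first-dash split: the prefix before the first '-' is kept untouched and the suffix is rebuilt in one comprehension (drop dashes, substitute hard consonants), assigned back via slice assignment.
import Mathlib
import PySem

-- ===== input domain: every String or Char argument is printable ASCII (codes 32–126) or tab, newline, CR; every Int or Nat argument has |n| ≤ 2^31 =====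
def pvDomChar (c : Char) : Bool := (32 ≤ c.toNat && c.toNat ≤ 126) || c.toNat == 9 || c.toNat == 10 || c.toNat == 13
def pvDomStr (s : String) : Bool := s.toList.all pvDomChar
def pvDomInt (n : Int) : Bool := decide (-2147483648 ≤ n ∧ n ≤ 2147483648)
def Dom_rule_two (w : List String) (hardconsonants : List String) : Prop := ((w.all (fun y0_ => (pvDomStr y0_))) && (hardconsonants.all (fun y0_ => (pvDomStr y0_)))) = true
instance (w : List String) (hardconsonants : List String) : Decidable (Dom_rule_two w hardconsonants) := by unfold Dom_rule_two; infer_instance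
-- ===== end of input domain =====

-- B replaces A's flag-carrying pop/index state machine with a first-dash split (keep prefix,
-- rebuild suffix in one comprehension); simpler. Both A and B mutate w in place to the same
-- final contents; the equivalence proved here is about the return value.


-- ===== PORT A =====
-- the while loop, as structural recursion over the same state: `done` is w[:index]
-- (already scanned, replacements applied), `rest` is w[index:]; popping a "-" drops
-- the head of `rest`, otherwise the (possibly replaced) head moves into `done`
def ruleTwoLoop (done : List String) (rest : List String) (mk : Bool) (repl : String) (hard : List String) : List String :=
  match rest with
  | [] => done
  | c :: t =>
      if c = "-" then ruleTwoLoop done t true repl hard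
      else ruleTwoLoop (done ++ [if mk && decide (c ∈ hard) then repl else c]) t mk repl hard

def rule_two (w : List String) (hardconsonants : List String) : List String :=
  match w with
  | [] => []          -- w[0] raises IndexError in Python; excluded by Pre_rule_two
  | r :: _ => ruleTwoLoop [] w false r hardconsonants

-- ===== PORT B =====
def rule_two_alt (w : List String) (hardconsonants : List String) : List String :=
  match w with
  | [] => []          -- w[0] raises IndexError in Python; excluded by Pre_rule_two
  | r :: _ =>
    if w.contains "-" then
      match PySem.List.index? w "-" with
      | some i =>
          w.take i ++ ((w.drop i).filter (fun c => c ≠ "-")).map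
            (fun c => if c ∈ hardconsonants then r else c)
      | none => w     -- unreachable: "-" ∈ w
    else w

-- ===== PRECONDITION & SPEC =====
-- Pre_ excludes only the empty list, on which both Pythons raise IndexError at w[0].
def Pre_rule_two (w : List String) (hardconsonants : List String) : Prop := w ≠ []
instance (w : List String) (hardconsonants : List String) : Decidable (Pre_rule_two w hardconsonants) := by unfold Pre_rule_two; infer_instance
def pvWitness_rule_two : List String × List String := (["n", "-", "k", "a"], ["k", "g"])

def Spec_rule_two (w : List String) (hardconsonants : List String) (out : List String) : Prop := out = rule_two_alt w hardconsonants
instance (w : List String) (hardconsonants : List String) (out : List String) : Decidable (Spec_rule_two w hardconsonants out) := by unfold Spec_rule_two; infer_instance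

-- ===== CLAIM (what is proved, stated in full; the proofs are below) =====
def Claim_equal_rule_two : Prop := ∀ (w : List String) (hardconsonants : List String), Dom_rule_two w hardconsonants → Pre_rule_two w hardconsonants → Spec_rule_two w hardconsonants (rule_two w hardconsonants)

-- ===== LEMMAS AND PROOFS =====
theorem ruleTwoLoop_true (repl : String) (hard : List String) :
    ∀ (l done : List String),
      ruleTwoLoop done l true repl hard =
        done ++ (l.filter (fun c => c ≠ "-")).map (fun c => if c ∈ hard then repl else c) := by
  intro l
  induction l with
  | nil => intro done; simp [ruleTwoLoop]
  | cons c t ih =>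
      intro done
      by_cases hc : c = "-" <;> simp [ruleTwoLoop, hc, ih]

theorem ruleTwoLoop_false (repl : String) (hard : List String) :
    ∀ (l done : List String),
      ruleTwoLoop done l false repl hard =
        done ++ match PySem.List.index? l "-" with
          | some i => l.take i ++ ((l.drop i).filter (fun c => c ≠ "-")).map
              (fun c => if c ∈ hard then repl else c)
          | none => l := by
  intro l
  induction l with
  | nil => simp [ruleTwoLoop, PySem.List.index?]
  | cons c t ih =>
      intro done
      by_cases hc : c = "-"
      · subst hc
        rw [PySem.List.index?_cons_self]
        simp [ruleTwoLoop, ruleTwoLoop_true]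
      · rw [show PySem.List.index? (c :: t) "-" = (PySem.List.index? t "-").map (· + 1) from
            PySem.List.index?_cons_of_ne t hc]
        cases hidx : PySem.List.index? t "-" with
        | none =>
            rw [PySem.List.index?_eq_idxOf?] at hidx
            simp [ruleTwoLoop, hc, ih, hidx]
        | some i =>
            rw [PySem.List.index?_eq_idxOf?] at hidx
            simp [ruleTwoLoop, hc, ih, hidx]

-- ===== VERDICT =====
theorem rule_two_spec : Claim_equal_rule_two := by
  intro w hard _ hpre
  match w with
  | [] => exact absurd rfl hpre
  | r :: t =>
      show ruleTwoLoop [] (r :: t) false r hard = rule_two_alt (r :: t) hard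
      rw [ruleTwoLoop_false r hard (r :: t) [], List.nil_append]
      by_cases hin : "-" ∈ r :: t
      · cases hidx : PySem.List.index? (r :: t) "-" with
        | none => exact absurd hin ((PySem.List.index?_eq_none_iff _ _).mp hidx)
        | some i =>
            rw [PySem.List.index?_eq_idxOf?] at hidx
            simp [rule_two_alt, List.mem_cons.mp hin, hidx]
      · have hidx : PySem.List.index? (r :: t) "-" = none := (PySem.List.index?_eq_none_iff _ _).mpr hin
        rw [PySem.List.index?_eq_idxOf?] at hidx
        simp only [List.mem_cons, not_or] at hin
        simp [rule_two_alt, hidx, hin.1, hin.2]
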